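-- pv_equiv track=rewrite | github.com/Sairajsawant123/video-quetions | video_quetions.py | parse_questions_and_answers
-- ===== SOURCE A (Python) =====
-- def parse_questions_and_answers(gpt_response):
--     questions = []
--     answers = []
--
--     # Split the response into lines
--     lines = gpt_response.split("\n")
--
--     # Iterate through lines to extract questions and answers
--     for i in range(len(lines)):
--         if lines[i].startswith("Q:"):
--             questions.append(lines[i][3:].strip())  # Extract question text
--             if i + 1 < len(lines) and lines[i + 1].startswith("A:"):
--                 answers.append(lines[i + 1][3:].strip())  # Extract answer text
--             else:
--                 answers.append("")  # If no answer is found, add an empty string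
--
--     return questions, answers
-- ===== SOURCE B (Python) =====
-- def parse_questions_and_answers(gpt_response):
--     # Consuming scanner: advance through an iterator of lines; when a question is
--     # found, consume its answer line too (an "A:" line can never itself be a
--     # question, so skipping it is safe).
--     questions = []
--     answers = []
--     it = iter(gpt_response.split("\n"))
--     line = next(it, None)
--     while line is not None:
--         if line.startswith("Q:"):
--             questions.append(line[3:].strip())
--             line = next(it, None)
--             if line is not None and line.startswith("A:"):
--                 answers.append(line[3:].strip())
--                 line = next(it, None)
--             else:
--                 answers.append("")
--         else:
--             line = next(it, None)
--     return questions, answers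
-- ===== Notes on version B (the rewrite author's own statement) =====
-- stated objective: alternative
-- what changed: Replaces A's index loop with i+1 lookahead by a consuming scanner over an iterator of lines: on a question line it also consumes the following answer line (which can never itself be a question), so no indices or lookahead remain.
import Mathlib
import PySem

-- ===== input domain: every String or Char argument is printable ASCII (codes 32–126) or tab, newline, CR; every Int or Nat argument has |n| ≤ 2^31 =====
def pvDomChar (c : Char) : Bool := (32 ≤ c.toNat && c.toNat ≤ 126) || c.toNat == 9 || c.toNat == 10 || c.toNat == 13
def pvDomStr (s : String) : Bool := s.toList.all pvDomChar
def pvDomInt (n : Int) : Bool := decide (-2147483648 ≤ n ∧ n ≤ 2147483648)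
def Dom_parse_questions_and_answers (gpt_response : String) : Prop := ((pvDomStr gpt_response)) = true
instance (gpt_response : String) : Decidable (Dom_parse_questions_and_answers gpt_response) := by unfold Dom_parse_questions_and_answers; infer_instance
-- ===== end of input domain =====

-- B replaces A's index loop with i+1 lookahead by a consuming scanner that, on a
-- question line, also consumes the following answer line: an alternative decomposition
-- with no indices; same cost.

-- ===== PORT A =====
-- line[3:].strip() (written verbatim in both Pythons)
def pvStrip3 (l : String) : String := PySem.Str.strip (PySem.Str.slice l (some 3) none)

-- the 'for i in range(len(lines))' loop of A, appending to questions/answers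
def pvLoopA (lines : List String) (i : Nat) (qs as : List String) : List String × List String :=
  if i < lines.length then
    if PySem.Str.startswith (PySem.List.pyGetD lines (i : Int) "") "Q:" then
      pvLoopA lines (i + 1) (qs ++ [pvStrip3 (PySem.List.pyGetD lines (i : Int) "")])
        (if i + 1 < lines.length &&
            PySem.Str.startswith (PySem.List.pyGetD lines ((i : Int) + 1) "") "A:" then
          as ++ [pvStrip3 (PySem.List.pyGetD lines ((i : Int) + 1) "")]
        else
          as ++ [""])
    else
      pvLoopA lines (i + 1) qs as
  else (qs, as)
termination_by lines.length - i

def parse_questions_and_answers (gpt_response : String) : List String × List String :=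
  pvLoopA ((PySem.Str.split? gpt_response "\n").getD []) 0 [] []

-- ===== PORT B =====
-- Source B's while loop over the iterator: the list of not-yet-consumed lines is the
-- iterator's remaining state; a question line consumes its "A:" successor as well.
def pvScanB (lines : List String) (qs as : List String) : List String × List String :=
  match lines with
  | [] => (qs, as)
  | l :: rest =>
    if PySem.Str.startswith l "Q:" then
      match rest with
      | n :: rest' =>
        if PySem.Str.startswith n "A:" then
          pvScanB rest' (qs ++ [pvStrip3 l]) (as ++ [pvStrip3 n])
        else
          pvScanB (n :: rest') (qs ++ [pvStrip3 l]) (as ++ [""])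
      | [] => (qs ++ [pvStrip3 l], as ++ [""])
    else
      pvScanB rest qs as
termination_by lines.length

def parse_questions_and_answers_alt (gpt_response : String) : List String × List String :=
  pvScanB ((PySem.Str.split? gpt_response "\n").getD []) [] []

-- ===== PRECONDITION & SPEC =====
def Spec_parse_questions_and_answers (gpt_response : String) (out : List String × List String) : Prop := out = parse_questions_and_answers_alt gpt_response
instance (gpt_response : String) (out : List String × List String) : Decidable (Spec_parse_questions_and_answers gpt_response out) := by unfold Spec_parse_questions_and_answers; infer_instance

-- ===== CLAIM (what is proved, stated in full; the proofs are below) =====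
def Claim_equal_parse_questions_and_answers : Prop := ∀ (gpt_response : String), Dom_parse_questions_and_answers gpt_response → Spec_parse_questions_and_answers gpt_response (parse_questions_and_answers gpt_response)

-- ===== LEMMAS AND PROOFS =====

-- the answer contributed by the line after a Q-line (the head of the remaining lines)
def pvAnsHead : List String → String
  | [] => ""
  | n :: _ => if PySem.Str.startswith n "A:" then pvStrip3 n else ""

-- recursive characterisation of the (questions, answers) pair of a line list
def pvPairs : List String → List String × List String
  | [] => ([], [])
  | l :: rest =>
    if PySem.Str.startswith l "Q:" then
      (pvStrip3 l :: (pvPairs rest).1, pvAnsHead rest :: (pvPairs rest).2)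
    else pvPairs rest

lemma pvGetD_append_len (pre : List String) (l : String) (rest : List String) :
    PySem.List.pyGetD (pre ++ l :: rest) (pre.length : Int) "" = l := by
  rw [PySem.List.pyGetD_natCast]
  simp [List.getD]

lemma pvGetD_append_len_succ (pre : List String) (l : String) (rest : List String) :
    PySem.List.pyGetD (pre ++ l :: rest) ((pre.length : Int) + 1) "" = rest.getD 0 "" := by
  have h : ((pre.length : Int) + 1) = ((pre.length + 1 : Nat) : Int) := by push_cast; ring
  rw [h, PySem.List.pyGetD_natCast]
  simp [List.getD, List.getElem?_append_right (Nat.le_succ_of_le (Nat.le_refl pre.length))]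

lemma pvLoopA_eq (rest pre : List String) (qs as : List String) :
    pvLoopA (pre ++ rest) pre.length qs as =
      (qs ++ (pvPairs rest).1, as ++ (pvPairs rest).2) := by
  induction rest generalizing pre qs as with
  | nil => rw [pvLoopA]; simp [pvPairs]
  | cons l rest ih =>
    have hstep : ∀ qs' as', pvLoopA (pre ++ l :: rest) (pre.length + 1) qs' as' =
        (qs' ++ (pvPairs rest).1, as' ++ (pvPairs rest).2) := by
      intro qs' as'
      simpa using ih (pre ++ [l]) qs' as'
    have hlen : pre.length < (pre ++ l :: rest).length := by simp
    rw [pvLoopA, if_pos hlen, pvGetD_append_len, pvGetD_append_len_succ]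
    by_cases hq : PySem.Str.startswith l "Q:"
    · have hq' : PySem.Chars.startswith l.toList ['Q', ':'] = true := by simpa using hq
      rw [if_pos hq, hstep]
      cases rest with
      | nil =>
        simp [pvPairs, pvAnsHead, hq']
      | cons n rest' =>
        have hc : pre.length + 1 < (pre ++ l :: n :: rest').length := by simp
        simp [pvPairs, pvAnsHead, hq', List.getD]
        split_ifs <;> simp
    · have hq' : PySem.Chars.startswith l.toList ['Q', ':'] = false := by simpa using hq
      rw [if_neg hq, hstep]
      simp [pvPairs, hq']

-- a line starting with "A:" does not start with "Q:"
lemma pvA_not_Q (n : String) (h : PySem.Str.startswith n "A:" = true) :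
    PySem.Str.startswith n "Q:" = false := by
  have h1 : PySem.Chars.startswith n.toList ['A', ':'] = true := by simpa using h
  obtain ⟨t, ht⟩ := (PySem.Chars.startswith_iff _ _).mp h1
  suffices hQ : PySem.Chars.startswith n.toList ['Q', ':'] = false by simpa using hQ
  rw [← ht, Bool.eq_false_iff]
  intro hc
  obtain ⟨t', ht'⟩ := (PySem.Chars.startswith_iff _ _).mp hc
  simp at ht'

-- B's consuming scanner computes pvPairs
lemma pvScanB_eq (lines : List String) (qs as : List String) :
    pvScanB lines qs as = (qs ++ (pvPairs lines).1, as ++ (pvPairs lines).2) := by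
  match lines with
  | [] => simp [pvScanB.eq_def, pvPairs]
  | l :: rest =>
    rw [pvScanB.eq_def]
    by_cases hq : PySem.Str.startswith l "Q:"
    · have hq' : PySem.Chars.startswith l.toList ['Q', ':'] = true := by simpa using hq
      match rest with
      | [] => simp [hq', pvPairs, pvAnsHead]
      | n :: rest' =>
        by_cases hA : PySem.Str.startswith n "A:"
        · have hA' : PySem.Chars.startswith n.toList ['A', ':'] = true := by simpa using hA
          have hAQ : PySem.Chars.startswith n.toList ['Q', ':'] = false := by
            simpa using pvA_not_Q n hA
          simp only [hq, hA, if_true]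
          rw [pvScanB_eq rest']
          simp [pvPairs, pvAnsHead, hq', hA', hAQ]
        · have hA' : PySem.Chars.startswith n.toList ['A', ':'] = false := by
            simpa using hA
          simp only [hq, hA, if_true]
          rw [pvScanB_eq (n :: rest')]
          simp [pvPairs, pvAnsHead, hq', hA']
    · have hq' : PySem.Chars.startswith l.toList ['Q', ':'] = false := by simpa using hq
      simp only [hq]
      rw [pvScanB_eq rest]
      simp [pvPairs, hq']
termination_by lines.length

-- ===== VERDICT (by name: the statement is the Claim_ definition above) =====
theorem parse_questions_and_answers_spec : Claim_equal_parse_questions_and_answers := by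
  intro s _
  unfold Spec_parse_questions_and_answers parse_questions_and_answers parse_questions_and_answers_alt
  generalize (PySem.Str.split? s "\n").getD [] = lines
  have h1 : pvLoopA lines 0 [] [] = ((pvPairs lines).1, (pvPairs lines).2) := by
    simpa using pvLoopA_eq lines [] [] []
  rw [h1, pvScanB_eq]
  simp
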